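-- pv_equiv track=rewrite | github.com/huy-nguyen/2019-advent-of-code | day_04.py | has_at_least_two_repeating_digits
-- ===== SOURCE A (Python) =====
-- from typing import List, MutableSequence, Dict, Union
--
-- def get_all_repetition_sequence_lengths(input: List[int]) -> List[int]:
--     prev_digit = None
--     current_sequence_length = 0
--     all_sequence_lengths: List[int] = []
--     is_inside_sequence = False
--     for current_digit in input:
--         if current_digit == prev_digit:
--             current_sequence_length += 1
--             is_inside_sequence = True
--         else:
--             if is_inside_sequence:
--                 current_sequence_length += 1
--                 all_sequence_lengths.append(current_sequence_length)
--                 current_sequence_length = 0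
--             is_inside_sequence = False
--         prev_digit = current_digit
--
--     if current_sequence_length > 0:
--         current_sequence_length += 1
--         all_sequence_lengths.append(current_sequence_length)
--     return all_sequence_lengths
--
-- def has_at_least_two_repeating_digits(input: List[int]) -> bool:
--     repetition_sequence_lengths = get_all_repetition_sequence_lengths(input)
--     repetition_sequence_longer_than_2: List[bool] = [
--         x >= 2 for x in repetition_sequence_lengths
--     ]
--     return len(repetition_sequence_longer_than_2) > 0 and any(
--         repetition_sequence_longer_than_2
--     )
-- ===== SOURCE B (Python) =====
-- def has_at_least_two_repeating_digits(input):
--     return any(a == b for a, b in zip(input, input[1:]))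
-- ===== Notes on version B (the rewrite author's own statement) =====
-- stated objective: simpler
-- what changed: B drops the run-length-table helper and the derived boolean list entirely and answers directly with one adjacent-pair scan that returns True at the first equal neighbours.
import Mathlib
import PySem

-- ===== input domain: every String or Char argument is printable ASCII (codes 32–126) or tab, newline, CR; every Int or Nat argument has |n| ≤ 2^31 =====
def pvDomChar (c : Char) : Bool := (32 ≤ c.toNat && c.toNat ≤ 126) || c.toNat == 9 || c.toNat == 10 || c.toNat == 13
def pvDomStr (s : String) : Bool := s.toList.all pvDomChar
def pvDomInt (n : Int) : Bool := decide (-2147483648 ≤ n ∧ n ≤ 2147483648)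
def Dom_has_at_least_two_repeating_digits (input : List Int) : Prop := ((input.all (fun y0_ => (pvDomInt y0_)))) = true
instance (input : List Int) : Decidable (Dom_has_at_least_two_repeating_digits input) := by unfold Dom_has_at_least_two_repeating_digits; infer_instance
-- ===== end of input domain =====

-- B drops the run-length-table helper and answers directly with one adjacent-pair scan (simpler decomposition, same cost).

-- ===== PORT A =====
-- helper: the loop of get_all_repetition_sequence_lengths, state = (prev, current_sequence_length, acc, is_inside_sequence)
def pvRunsLoop (xs : List Int) (prev : Option Int) (cur : Int) (acc : List Int)
    (inside : Bool) : List Int :=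
  match xs with
  | [] => if cur > 0 then acc ++ [cur + 1] else acc
  | x :: rest =>
    if some x == prev then
      pvRunsLoop rest (some x) (cur + 1) acc true
    else if inside then
      pvRunsLoop rest (some x) 0 (acc ++ [cur + 1]) false
    else
      pvRunsLoop rest (some x) cur acc false

def get_all_repetition_sequence_lengths (input : List Int) : List Int :=
  pvRunsLoop input none 0 [] false

def has_at_least_two_repeating_digits (input : List Int) : Bool :=
  let repetition_sequence_lengths := get_all_repetition_sequence_lengths input
  let repetition_sequence_longer_than_2 :=
    repetition_sequence_lengths.map (fun x => decide (x ≥ 2))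
  decide (repetition_sequence_longer_than_2.length > 0) &&
    repetition_sequence_longer_than_2.any id

-- ===== PORT B =====
-- any(a == b for a, b in zip(input, input[1:]))
def has_at_least_two_repeating_digits_alt (input : List Int) : Bool :=
  (input.zip input.tail).any (fun p => p.1 == p.2)

-- ===== PRECONDITION & SPEC =====
def Spec_has_at_least_two_repeating_digits (input : List Int) (out : Bool) : Prop := out = has_at_least_two_repeating_digits_alt input
instance (input : List Int) (out : Bool) : Decidable (Spec_has_at_least_two_repeating_digits input out) := by unfold Spec_has_at_least_two_repeating_digits; infer_instance

-- ===== CLAIM (what is proved, stated in full; the proofs are below) =====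
def Claim_equal_has_at_least_two_repeating_digits : Prop := ∀ (input : List Int), Dom_has_at_least_two_repeating_digits input → Spec_has_at_least_two_repeating_digits input (has_at_least_two_repeating_digits input)

-- ===== LEMMAS AND PROOFS =====

-- the answer A extracts from a lengths list
def pvAns (L : List Int) : Bool :=
  decide ((L.map (fun x => decide (x ≥ 2))).length > 0) &&
    (L.map (fun x => decide (x ≥ 2))).any id

lemma pvAns_append_ge2 (acc : List Int) (c : Int) (h : c ≥ 2) :
    pvAns (acc ++ [c]) = true := by
  simp [pvAns, List.any_append]
  exact Or.inr h

-- B restated as a recursion from a previous element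
lemma alt_cons (x : Int) (rest : List Int) :
    has_at_least_two_repeating_digits_alt (x :: rest) =
      (match rest with
       | [] => false
       | y :: _ => (x == y) || has_at_least_two_repeating_digits_alt rest) := by
  cases rest with
  | nil => simp [has_at_least_two_repeating_digits_alt]
  | cons y r => simp [has_at_least_two_repeating_digits_alt, List.zip]

-- main invariant: for a loop already past at least one element (prev = some p),
-- with inside mirroring cur > 0 and cur ≥ 0,
-- the extracted answer is: something already recorded, a run in progress, or an
-- adjacency in p :: xs.
lemma runs_invariant (xs : List Int) : ∀ (p cur : Int) (acc : List Int),
    0 ≤ cur →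
    pvAns (pvRunsLoop xs (some p) cur acc (decide (0 < cur))) =
      (pvAns acc || decide (0 < cur) || has_at_least_two_repeating_digits_alt (p :: xs)) := by
  induction xs with
  | nil =>
    intro p cur acc hc
    by_cases h : 0 < cur
    · simp [pvRunsLoop, h, has_at_least_two_repeating_digits_alt,
        pvAns_append_ge2 acc (cur + 1) (by omega)]
    · simp [pvRunsLoop, h, has_at_least_two_repeating_digits_alt]
  | cons x rest ih =>
    intro p cur acc hc
    rw [alt_cons]
    by_cases hx : x = p
    · subst hx
      have : pvRunsLoop (x :: rest) (some x) cur acc (decide (0 < cur)) =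
          pvRunsLoop rest (some x) (cur + 1) acc true := by
        simp [pvRunsLoop]
      rw [this]
      have h1 : (true : Bool) = decide (0 < cur + 1) := by
        rw [eq_comm, decide_eq_true_iff]; omega
      rw [h1, ih x (cur + 1) acc (by omega)]
      simp
      exact Or.inl (Or.inr hc)
    · have hne : (some x == some p) = false := by
        simp [hx]
      by_cases h : 0 < cur
      · have : pvRunsLoop (x :: rest) (some p) cur acc (decide (0 < cur)) =
            pvRunsLoop rest (some x) 0 (acc ++ [cur + 1]) false := by
          simp [pvRunsLoop, hne, h]
        rw [this]
        have h0 : (false : Bool) = decide ((0:Int) < 0) := by decide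
        rw [h0, ih x 0 (acc ++ [cur + 1]) le_rfl]
        simp [pvAns_append_ge2 acc (cur + 1) (by omega), h]
      · have : pvRunsLoop (x :: rest) (some p) cur acc (decide (0 < cur)) =
            pvRunsLoop rest (some x) cur acc false := by
          simp [pvRunsLoop, hne, h]
        rw [this]
        have h0 : (false : Bool) = decide (0 < cur) := by simp [h]
        rw [h0, ih x cur acc hc]
        have hpx : (p == x) = false := by simp; exact fun hh => hx hh.symm
        simp [h, hpx]

-- ===== VERDICT (by name: the statement is the Claim_ definition above) =====
theorem has_at_least_two_repeating_digits_spec : Claim_equal_has_at_least_two_repeating_digits := by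
  intro input _
  unfold Spec_has_at_least_two_repeating_digits
  show pvAns (get_all_repetition_sequence_lengths input) = _
  cases input with
  | nil => simp [get_all_repetition_sequence_lengths, pvRunsLoop, pvAns,
      has_at_least_two_repeating_digits_alt]
  | cons x rest =>
    have step : get_all_repetition_sequence_lengths (x :: rest) =
        pvRunsLoop rest (some x) 0 [] (decide ((0:Int) < 0)) := by
      simp [get_all_repetition_sequence_lengths, pvRunsLoop]
    rw [step, runs_invariant rest x 0 [] le_rfl]
    simp [pvAns]
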